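-- pv_equiv track=rewrite | github.com/Vergil0327/leetcode-history | PrefixSum/3739. Count Subarrays With Majority Element II/solution.py | countMajoritySubarrays
-- ===== SOURCE A (Python) =====
-- from collections import Counter
-- from typing import List
--
-- def countMajoritySubarrays(nums: List[int], target: int) -> int:
--     """
--     A subarray has target as majority
--     if its balance increase is positive,
--     meaning target appears more than half.
--
--     count[x] stores how many prefixes have balance x.
--     acc[x] is the prefix sum of count.
--
--     Each step adds acc[pre - 1] to
--     count all earlier prefixes with smaller balance
--     these correspond to valid subarrays where target dominates.
--
--     acc[i] means the number of times the prefix sum <= i has occurred.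
--     There is an offset of n+1 used in the algorithm to map index with prefix sum, which works fine even if the prefix sum goes negative.
--     """
--     n = len(nums)
--     arr = [1 if x == target else -1 for x in nums]
--
--     count = Counter()
--     count[0] = 1
--
--     acc = [1] + [0] * (n + n + 2)
--     res = presum = 0
--     for num in arr:
--         presum += num
--         count[presum] += 1
--         acc[presum] = acc[presum - 1] + count[presum]
--         res += acc[presum - 1]
--     return res
-- ===== SOURCE B (Python) =====
-- def countMajoritySubarrays(nums, target):
--     # Direct quadratic definition: a subarray nums[i:j] is counted iff the
--     # prefix balance strictly increases from i to j; count those pairs directly.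
--     pre = [0]
--     for x in nums:
--         pre.append(pre[-1] + (1 if x == target else -1))
--     res = 0
--     for j in range(1, len(pre)):
--         for i in range(j):
--             if pre[i] < pre[j]:
--                 res += 1
--     return res
-- ===== Notes on version B (the rewrite author's own statement) =====
-- stated objective: simpler
-- what changed: A's Counter plus incrementally-patched cumulative array (with Python negative-index wraparound) is replaced by the direct quadratic definition: build the prefix-balance list and count the pairs i < j with pre[i] < pre[j].
import Mathlib
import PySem

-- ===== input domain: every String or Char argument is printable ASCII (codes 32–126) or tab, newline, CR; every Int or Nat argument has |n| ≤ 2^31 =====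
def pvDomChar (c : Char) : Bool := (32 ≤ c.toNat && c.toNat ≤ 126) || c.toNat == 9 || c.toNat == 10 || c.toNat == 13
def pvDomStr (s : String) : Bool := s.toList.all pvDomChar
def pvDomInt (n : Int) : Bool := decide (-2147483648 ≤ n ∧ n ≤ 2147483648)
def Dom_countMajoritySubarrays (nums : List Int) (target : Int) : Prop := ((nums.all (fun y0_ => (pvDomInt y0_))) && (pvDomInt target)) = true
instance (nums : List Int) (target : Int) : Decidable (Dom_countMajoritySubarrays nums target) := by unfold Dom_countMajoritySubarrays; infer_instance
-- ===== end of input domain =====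

-- B replaces A's O(n) balance-counting trick (Counter + incrementally patched cumulative array
-- with Python negative-index wraparound) by the plain quadratic definition: count the pairs
-- i < j of prefix balances with pre[i] < pre[j].  Objective: simpler (B trades speed for clarity).

-- ===== PORT A =====
def countMajoritySubarrays (nums : List Int) (target : Int) : Int :=
  let n := nums.length
  let arr := nums.map (fun x => if x = target then (1 : Int) else -1)
  let count : PySem.Dict Int Int := (PySem.Dict.empty).insert 0 1
  let acc : List Int := [(1 : Int)] ++ List.replicate (n + n + 2) (0 : Int)
  -- loop state is (count, acc, res, presum); acc indices |presum| ≤ n < 2n+3 are always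
  -- in range (Python negative indices wrap), so the total pySetD/pyGetD forms are exact here
  let st := arr.foldl (fun (s : PySem.Dict Int Int × List Int × Int × Int) num =>
    let presum := s.2.2.2 + num
    let count := s.1.modify presum 0 (· + 1)
    let acc := PySem.List.pySetD s.2.1 presum
        (PySem.List.pyGetD s.2.1 (presum - 1) 0 + count.getD presum 0)
    let res := s.2.2.1 + PySem.List.pyGetD acc (presum - 1) 0
    (count, acc, res, presum)) (count, acc, 0, 0)
  st.2.2.1

-- ===== PORT B =====
def countMajoritySubarrays_alt (nums : List Int) (target : Int) : Int :=
  let pre := nums.foldl (fun pre x =>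
      pre ++ [PySem.List.pyGetD pre (-1) 0 + (if x = target then (1 : Int) else -1)]) [(0 : Int)]
  (PySem.List.pyRange 1 (pre.length : Int)).foldl (fun res j =>
    (PySem.List.pyRange 0 j).foldl (fun res i =>
      if PySem.List.pyGetD pre i 0 < PySem.List.pyGetD pre j 0 then res + 1 else res) res) 0

-- ===== PRECONDITION & SPEC =====
def Spec_countMajoritySubarrays (nums : List Int) (target : Int) (out : Int) : Prop := out = countMajoritySubarrays_alt nums target
instance (nums : List Int) (target : Int) (out : Int) : Decidable (Spec_countMajoritySubarrays nums target out) := by unfold Spec_countMajoritySubarrays; infer_instance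

-- ===== CLAIM (what is proved, stated in full; the proofs are below) =====
def Claim_equal_countMajoritySubarrays : Prop := ∀ (nums : List Int) (target : Int), Dom_countMajoritySubarrays nums target → Spec_countMajoritySubarrays nums target (countMajoritySubarrays nums target)

-- ===== LEMMAS AND PROOFS =====

-- common abstract value: walking the ±1 deltas from balance p with earlier balances `seen`,
-- add for each new balance the number of strictly smaller earlier balances
def gLoop (seen : List Int) (p : Int) (deltas : List Int) : Int :=
  match deltas with
  | [] => 0
  | d :: rest => ((seen.countP (fun q => decide (q < p + d)) : Int)) + gLoop (seen ++ [p + d]) (p + d) rest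

-- the balances reached from p by the deltas, in order
def scanFrom (p : Int) (deltas : List Int) : List Int :=
  match deltas with
  | [] => []
  | d :: rest => (p + d) :: scanFrom (p + d) rest

-- pair count of pre from position k on: Σ_{k ≤ j < |pre|} #{i < j | pre[i] < pre[j]}
def pcf (pre : List Int) (k : Nat) : Int :=
  if _h : k < pre.length then
    ((pre.take k).countP (fun q => decide (q < pre.getD k 0)) : Int) + pcf pre (k + 1)
  else 0
termination_by pre.length - k

-- Python index wraparound for an in-range (possibly negative) index
def wIdx (len : Nat) (x : Int) : Nat := if 0 ≤ x then x.toNat else len - (-x).toNat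

lemma pyGetD_wIdx {α : Type} (xs : List α) (x : Int) (d : α)
    (h1 : -(xs.length : Int) ≤ x) (h2 : x < (xs.length : Int)) :
    PySem.List.pyGetD xs x d = xs.getD (wIdx xs.length x) d := by
  simp only [PySem.List.pyGetD, PySem.List.pyGet?, PySem.List.pyIdx?, wIdx]
  split_ifs with h
  · simp [List.getD_eq_getElem?_getD]
  · simp [List.getD_eq_getElem?_getD]

lemma pySetD_wIdx {α : Type} (xs : List α) (x : Int) (v : α)
    (h1 : -(xs.length : Int) ≤ x) (h2 : x < (xs.length : Int)) :
    PySem.List.pySetD xs x v = xs.set (wIdx xs.length x) v := by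
  simp only [PySem.List.pySetD, PySem.List.pySet?, PySem.List.pyIdx?, wIdx]
  split_ifs with h
  · simp
  · simp

lemma wIdx_inj (n : Nat) (x y : Int)
    (hx1 : -((n : Int) + 2) ≤ x) (hx2 : x ≤ n) (hy1 : -((n : Int) + 2) ≤ y) (hy2 : y ≤ n)
    (h : wIdx (2 * n + 3) x = wIdx (2 * n + 3) y) : x = y := by
  unfold wIdx at h; split_ifs at h <;> omega

lemma wIdx_lt (len : Nat) (x : Int)
    (_h0 : 0 < len) (h1 : -(len : Int) ≤ x) (h2 : x < (len : Int)) : wIdx len x < len := by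
  unfold wIdx; split_ifs <;> omega

lemma getD_set_eq {α : Type} (xs : List α) (j k : Nat) (v d : α) :
    (xs.set j v).getD k d = if k = j ∧ j < xs.length then v else xs.getD k d := by
  simp only [List.getD_eq_getElem?_getD, List.getElem?_set]
  by_cases hkj : k = j
  · subst hkj
    by_cases hl : k < xs.length
    · simp [hl]
    · simp [hl]
  · have h1 : ¬ (j = k) := fun h => hkj h.symm
    simp [h1, hkj]

-- over the integers, q ≤ v splits into q ≤ v - 1 or q = v
lemma cnt_split (l : List Int) (v : Int) :
    l.countP (fun q => decide (q ≤ v)) = l.countP (fun q => decide (q ≤ v - 1)) + l.count v := by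
  induction l with
  | nil => simp
  | cons a t ih =>
    simp only [List.countP_cons, List.count_cons, ih, beq_iff_eq]
    split_ifs <;> simp only [decide_eq_true_eq] at * <;> omega

lemma countP_lt_eq_le_sub_one (l : List Int) (v : Int) :
    l.countP (fun q => decide (q < v)) = l.countP (fun q => decide (q ≤ v - 1)) := by
  apply List.countP_congr
  intro q _
  simp only [decide_eq_true_eq]
  omega

-- (range k).countP (pred ∘ getD) = (take k).countP pred
lemma countP_range_getD (pre : List Int) (v : Int) (k : Nat) (hk : k ≤ pre.length) :
    (List.range k).countP (fun i => decide (pre.getD i 0 < v))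
      = (pre.take k).countP (fun q => decide (q < v)) := by
  induction k with
  | zero => simp
  | succ m ih =>
    rw [List.range_succ, List.countP_append, ih (by omega)]
    have hm : m < pre.length := by omega
    rw [List.take_add_one, List.countP_append]
    simp [List.getD_eq_getElem?_getD, List.getElem?_eq_getElem hm]

-- ---------- B side ----------

lemma pyGetD_neg_one {α : Type} (xs : List α) (p d : α) (h : xs.getLast? = some p) :
    PySem.List.pyGetD xs (-1) d = p := by
  have hne : xs ≠ [] := by intro he; simp [he] at h
  have hlen : 0 < xs.length := List.length_pos_iff.mpr hne
  simp only [PySem.List.pyGetD, PySem.List.pyGet?, PySem.List.pyIdx?]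
  rw [if_neg (by omega), if_pos (by omega)]
  have he : xs.length - ((-(-1 : Int)).toNat) = xs.length - 1 := by norm_num
  rw [he]
  rw [List.getLast?_eq_getElem?] at h
  simp [Option.bind, h]

lemma buildPre (target : Int) (l : List Int) :
    ∀ (seen : List Int) (p : Int), seen.getLast? = some p →
    l.foldl (fun pre x =>
        pre ++ [PySem.List.pyGetD pre (-1) 0 + (if x = target then (1 : Int) else -1)]) seen
      = seen ++ scanFrom p (l.map (fun x => if x = target then (1 : Int) else -1)) := by
  induction l with
  | nil => intro seen p _; simp [scanFrom]
  | cons x xs ih =>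
    intro seen p hp
    simp only [List.foldl_cons, List.map_cons, scanFrom]
    rw [pyGetD_neg_one seen p 0 hp]
    rw [ih (seen ++ [p + (if x = target then (1 : Int) else -1)])
        (p + (if x = target then (1 : Int) else -1)) (by simp)]
    simp

lemma gLoop_pcf (deltas : List Int) :
    ∀ (seen : List Int) (p : Int),
      gLoop seen p deltas = pcf (seen ++ scanFrom p deltas) seen.length := by
  induction deltas with
  | nil =>
    intro seen p
    simp only [gLoop, scanFrom, List.append_nil]
    rw [pcf]; simp
  | cons d rest ih =>
    intro seen p
    simp only [gLoop, scanFrom]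
    conv_rhs => rw [pcf]
    rw [dif_pos (by simp only [List.length_append, List.length_cons]; omega)]
    have h1 : ((seen ++ (p + d) :: scanFrom (p + d) rest).take seen.length) = seen := by
      simp [List.take_left']
    have h2 : (seen ++ (p + d) :: scanFrom (p + d) rest).getD seen.length 0 = p + d := by
      simp [List.getD_eq_getElem?_getD]
    rw [h1, h2]
    have h3 : seen ++ (p + d) :: scanFrom (p + d) rest
        = (seen ++ [p + d]) ++ scanFrom (p + d) rest := by simp
    rw [h3, ih (seen ++ [p + d]) (p + d)]
    simp

-- the double loop of B computes pcf
lemma outer_loop_pcf (pre : List Int) :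
    ∀ (k : Nat) (res : Int),
    (PySem.List.pyRange (k : Int) (pre.length : Int)).foldl (fun res j =>
      (PySem.List.pyRange 0 j).foldl (fun res i =>
        if PySem.List.pyGetD pre i 0 < PySem.List.pyGetD pre j 0 then res + 1 else res) res) res
      = res + pcf pre k := by
  intro k
  induction hn : pre.length - k using Nat.strong_induction_on generalizing k with
  | _ m ihm =>
    intro res
    by_cases hk : k < pre.length
    · rw [PySem.List.pyRange_one_cons (by exact_mod_cast hk)]
      simp only [List.foldl_cons]
      have hcast : ((k : Int) + 1) = ((k + 1 : Nat) : Int) := by push_cast; ring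
      rw [hcast, ihm (pre.length - (k + 1)) (by omega) (k + 1) rfl]
      have hcnt : List.countP (fun x => decide (PySem.List.pyGetD pre x 0 < PySem.List.pyGetD pre (k : Int) 0)) (PySem.List.pyRange 0 (k : Int))
          = List.countP (fun q => decide (q < pre.getD k 0)) (pre.take k) := by
        rw [PySem.List.pyRange_zero_natCast, List.countP_map,
          ← countP_range_getD pre (pre.getD k 0) k (le_of_lt hk)]
        apply List.countP_congr
        intro i hi
        simp [PySem.List.pyGetD_natCast]
      rw [PySem.List.foldl_ite_add_one
          (p := fun i => PySem.List.pyGetD pre i 0 < PySem.List.pyGetD pre (k : Int) 0), hcnt]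
      conv_rhs => rw [pcf]
      rw [dif_pos hk]
      ring
    · conv_rhs => rw [pcf]
      rw [dif_neg hk]
      have hnil : PySem.List.pyRange (k : Int) (pre.length : Int) = [] := by
        simp [PySem.List.pyRange]; omega
      rw [hnil]; simp

-- ---------- A side: the loop invariant of the Counter/acc trick ----------

lemma loopA (n : Nat) (deltas : List Int) :
    ∀ (seen : List Int) (count : PySem.Dict Int Int) (acc : List Int) (res p : Int),
    (∀ d ∈ deltas, d = 1 ∨ d = -1) →
    p.natAbs + deltas.length ≤ n →
    acc.length = 2 * n + 3 →
    (∀ x : Int, count.getD x 0 = (seen.count x : Int)) →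
    (∀ x : Int, -(n : Int) - 1 ≤ x → x ≤ p →
        PySem.List.pyGetD acc x 0 = ((seen.countP (fun q => decide (q ≤ x)) : Int))) →
    (deltas.foldl (fun (s : PySem.Dict Int Int × List Int × Int × Int) num =>
       let presum := s.2.2.2 + num
       let count := s.1.modify presum 0 (· + 1)
       let acc := PySem.List.pySetD s.2.1 presum
           (PySem.List.pyGetD s.2.1 (presum - 1) 0 + count.getD presum 0)
       let res := s.2.2.1 + PySem.List.pyGetD acc (presum - 1) 0
       (count, acc, res, presum)) (count, acc, res, p)).2.2.1
      = res + gLoop seen p deltas := by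
  induction deltas with
  | nil => intro seen count acc res p _ _ _ _ _; simp [gLoop]
  | cons d rest ih =>
    intro seen count acc res p hd hb hlen hcount hacc
    simp only [List.foldl_cons]
    have hdv : d = 1 ∨ d = -1 := hd d List.mem_cons_self
    have hrest : ∀ x ∈ rest, x = 1 ∨ x = -1 := fun x hx => hd x (List.mem_cons_of_mem d hx)
    have hb' : (p + d).natAbs + rest.length ≤ n := by
      simp only [List.length_cons] at hb
      rcases hdv with rfl | rfl <;> omega
    have hpd1 : p + d - 1 ≤ p := by rcases hdv with rfl | rfl <;> omega
    have hple : ∀ x : Int, x ≤ p + d → x ≠ p + d → x ≤ p := by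
      intro x h1 h2; rcases hdv with rfl | rfl <;> omega
    have hbnd : -(n : Int) ≤ p + d ∧ p + d ≤ n := by omega
    have hlenI : ((acc.length : Int)) = 2 * (n : Int) + 3 := by rw [hlen]; push_cast; ring
    have hr1 : -((acc.length : Int)) ≤ p + d := by omega
    have hr2 : p + d < (acc.length : Int) := by omega
    have hset : PySem.List.pySetD acc (p + d)
          (PySem.List.pyGetD acc (p + d - 1) 0 + (count.modify (p + d) 0 (fun v => v + 1)).getD (p + d) 0)
        = acc.set (wIdx acc.length (p + d))
          (PySem.List.pyGetD acc (p + d - 1) 0 + (count.modify (p + d) 0 (fun v => v + 1)).getD (p + d) 0) :=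
      pySetD_wIdx _ _ _ hr1 hr2
    rw [hset]
    have hcount' : ∀ x : Int,
        (count.modify (p + d) 0 (fun v => v + 1)).getD x 0 = ((seen ++ [p + d]).count x : Int) := by
      intro x
      rw [PySem.Dict.getD_modify]
      by_cases hx : x = p + d
      · subst hx
        rw [if_pos rfl, hcount (p + d), List.count_append]
        simp
      · rw [if_neg hx, hcount x, List.count_append]
        simp [show ¬p + d = x from fun h => hx h.symm]
    have haccS : ∀ x : Int, -(n : Int) - 1 ≤ x → x ≤ p + d →
        PySem.List.pyGetD (acc.set (wIdx acc.length (p + d))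
            (PySem.List.pyGetD acc (p + d - 1) 0 + (count.modify (p + d) 0 (fun v => v + 1)).getD (p + d) 0)) x 0
          = (((seen ++ [p + d]).countP (fun q => decide (q ≤ x)) : Nat) : Int) := by
      intro x hx1 hx2
      have hxr1 : -(((acc.set (wIdx acc.length (p + d))
          (PySem.List.pyGetD acc (p + d - 1) 0 + (count.modify (p + d) 0 (fun v => v + 1)).getD (p + d) 0)).length : Int)) ≤ x := by
        simp only [List.length_set]; omega
      have hxr2 : x < (((acc.set (wIdx acc.length (p + d))
          (PySem.List.pyGetD acc (p + d - 1) 0 + (count.modify (p + d) 0 (fun v => v + 1)).getD (p + d) 0)).length : Int)) := by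
        simp only [List.length_set]; omega
      rw [pyGetD_wIdx _ x 0 hxr1 hxr2, List.length_set]
      rw [getD_set_eq]
      by_cases hxp : x = p + d
      · subst hxp
        rw [if_pos ⟨rfl, wIdx_lt acc.length (p + d) (by omega) hr1 hr2⟩]
        rw [hacc (p + d - 1) (by omega) hpd1, hcount' (p + d)]
        have hsplit := cnt_split (seen ++ [p + d]) (p + d)
        have h0 : (seen ++ [p + d]).countP (fun q => decide (q ≤ p + d - 1))
            = seen.countP (fun q => decide (q ≤ p + d - 1)) := by
          rw [List.countP_append]
          simp
        omega
      · have hxle : x ≤ p := hple x hx2 hxp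
        have hne : ¬ (wIdx acc.length x = wIdx acc.length (p + d) ∧ wIdx acc.length (p + d) < acc.length) := by
          intro hc
          apply hxp
          rw [hlen] at hc
          exact wIdx_inj n x (p + d) (by omega) (by omega) (by omega) (by omega) hc.1
        rw [if_neg hne]
        rw [← pyGetD_wIdx acc x 0 (by omega) (by omega)]
        rw [hacc x hx1 hxle, List.countP_append]
        simp [show ¬(p + d ≤ x) by omega]
    rw [ih (seen ++ [p + d]) (count.modify (p + d) 0 (fun v => v + 1))
        (acc.set (wIdx acc.length (p + d))
          (PySem.List.pyGetD acc (p + d - 1) 0 + (count.modify (p + d) 0 (fun v => v + 1)).getD (p + d) 0))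
        (res + PySem.List.pyGetD (acc.set (wIdx acc.length (p + d))
          (PySem.List.pyGetD acc (p + d - 1) 0 + (count.modify (p + d) 0 (fun v => v + 1)).getD (p + d) 0)) (p + d - 1) 0)
        (p + d) hrest hb' (by simp [hlen]) hcount' haccS]
    rw [haccS (p + d - 1) (by omega) (by omega)]
    have hL : (seen ++ [p + d]).countP (fun q => decide (q ≤ p + d - 1))
        = seen.countP (fun q => decide (q < p + d)) := by
      rw [List.countP_append, ← countP_lt_eq_le_sub_one]
      simp
    rw [hL]
    simp only [gLoop]
    ring

lemma A_eq (nums : List Int) (target : Int) :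
    countMajoritySubarrays nums target
      = gLoop [0] 0 (nums.map (fun x => if x = target then (1 : Int) else -1)) := by
  have h1 : ∀ d ∈ nums.map (fun x => if x = target then (1 : Int) else -1), d = 1 ∨ d = -1 := by
    intro dd hdd
    rcases List.mem_map.mp hdd with ⟨x, _, rfl⟩
    by_cases hxt : x = target <;> simp [hxt]
  have h2 : (0 : Int).natAbs + (nums.map (fun x => if x = target then (1 : Int) else -1)).length ≤ nums.length := by
    simp
  have h3 : ([(1 : Int)] ++ List.replicate (nums.length + nums.length + 2) (0 : Int)).length
      = 2 * nums.length + 3 := by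
    simp; omega
  have h4 : ∀ x : Int, ((PySem.Dict.empty : PySem.Dict Int Int).insert 0 1).getD x 0
      = (([(0 : Int)].count x : Nat) : Int) := by
    intro x
    rw [PySem.Dict.getD_insert]
    by_cases hx : x = 0
    · simp [hx]
    · simp [hx, PySem.Dict.getD_empty, show ¬(0 : Int) = x from fun h => hx h.symm]
  have h5 : ∀ x : Int, -(nums.length : Int) - 1 ≤ x → x ≤ 0 →
      PySem.List.pyGetD ([(1 : Int)] ++ List.replicate (nums.length + nums.length + 2) (0 : Int)) x 0
        = (([(0 : Int)].countP (fun q => decide (q ≤ x)) : Nat) : Int) := by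
    intro x hx1 hx2
    have hlenI : ((([(1 : Int)] ++ List.replicate (nums.length + nums.length + 2) (0 : Int)).length : Nat) : Int)
        = 2 * (nums.length : Int) + 3 := by rw [h3]; push_cast; ring
    rw [pyGetD_wIdx _ x 0 (by omega) (by omega), h3]
    by_cases hx0 : 0 ≤ x
    · have hx00 : x = 0 := le_antisymm hx2 hx0
      subst hx00
      simp [wIdx]
    · have ht : 1 ≤ wIdx (2 * nums.length + 3) x := by
        unfold wIdx; rw [if_neg hx0]; omega
      obtain ⟨j, hj⟩ : ∃ j, wIdx (2 * nums.length + 3) x = j + 1 := ⟨wIdx (2 * nums.length + 3) x - 1, by omega⟩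
      rw [hj]
      have hz : ([(1 : Int)] ++ List.replicate (nums.length + nums.length + 2) (0 : Int)).getD (j + 1) 0 = 0 := by
        rcases Nat.lt_or_ge j (nums.length + nums.length + 2) with h | h
        · exact List.getD_replicate _ h
        · rw [List.getD_eq_getElem?_getD, List.getElem?_eq_none_iff.mpr (by simp; omega)]
          rfl
      rw [hz]
      simp [hx0]
  have hA := loopA nums.length (nums.map (fun x => if x = target then (1 : Int) else -1)) [0]
      ((PySem.Dict.empty : PySem.Dict Int Int).insert 0 1)
      ([(1 : Int)] ++ List.replicate (nums.length + nums.length + 2) (0 : Int)) 0 0 h1 h2 h3 h4 h5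
  unfold countMajoritySubarrays
  simpa using hA

lemma B_eq (nums : List Int) (target : Int) :
    countMajoritySubarrays_alt nums target
      = gLoop [0] 0 (nums.map (fun x => if x = target then (1 : Int) else -1)) := by
  have hpre := buildPre target nums [0] 0 rfl
  have hout := outer_loop_pcf
      ([(0 : Int)] ++ scanFrom 0 (nums.map (fun x => if x = target then (1 : Int) else -1))) 1 0
  push_cast at hout
  unfold countMajoritySubarrays_alt
  simp only [hpre]
  rw [hout, gLoop_pcf (nums.map (fun x => if x = target then (1 : Int) else -1)) [0] 0]
  norm_num

-- ===== VERDICT (by name: the statement is the Claim_ definition above) =====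
theorem countMajoritySubarrays_spec : Claim_equal_countMajoritySubarrays := by
  intro nums target _
  unfold Spec_countMajoritySubarrays
  rw [A_eq, B_eq]
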